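-- pv_equiv track=rewrite | github.com/Aniket2124/Python-Insight | loop.py | fun_loop_task
-- ===== SOURCE A (Python) =====
-- def fun_loop_task(start, n):
--     Numbers = []
--     primeNumber = []
--
--     for num in range(1, n+1):
--
--         for i in range(2, num):
--             if (num % i) == 0:
--                 break
--         else:
--             primeNumber.append(num)
--
--         if num in primeNumber:
--             Numbers.append("Prime")
--         elif num % 3 == 0 and num % 5 == 0:
--             Numbers.append("FizzBuzz")
--         elif num % 3 == 0:
--             Numbers.append("Fizz")
--         elif num % 5 == 0:
--             Numbers.append("Buzz")
--
--         else:
--             Numbers.append(str(num))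
--     return Numbers
-- ===== SOURCE B (Python) =====
-- def fun_loop_task(start, n):
--     def is_prime(num):
--         # trial division only up to sqrt(num); 1 (and 2) have no trial
--         # divisors, so they count as "Prime", matching the task's rule
--         i = 2
--         while i * i <= num:
--             if num % i == 0:
--                 return False
--             i += 1
--         return True
--
--     def classify(num):
--         if is_prime(num):
--             return "Prime"
--         if num % 15 == 0:
--             return "FizzBuzz"
--         if num % 3 == 0:
--             return "Fizz"
--         if num % 5 == 0:
--             return "Buzz"
--         return str(num)
--
--     return [classify(num) for num in range(1, n + 1)]
-- ===== Notes on version B (the rewrite author's own statement) =====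
-- stated objective: faster
-- what changed: Replaces A's full trial division over range(2,num) plus an accumulated prime list with membership test by a sqrt-bounded trial-division predicate and a single comprehension (mod-15 for FizzBuzz), removing the growing list entirely.
import Mathlib
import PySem

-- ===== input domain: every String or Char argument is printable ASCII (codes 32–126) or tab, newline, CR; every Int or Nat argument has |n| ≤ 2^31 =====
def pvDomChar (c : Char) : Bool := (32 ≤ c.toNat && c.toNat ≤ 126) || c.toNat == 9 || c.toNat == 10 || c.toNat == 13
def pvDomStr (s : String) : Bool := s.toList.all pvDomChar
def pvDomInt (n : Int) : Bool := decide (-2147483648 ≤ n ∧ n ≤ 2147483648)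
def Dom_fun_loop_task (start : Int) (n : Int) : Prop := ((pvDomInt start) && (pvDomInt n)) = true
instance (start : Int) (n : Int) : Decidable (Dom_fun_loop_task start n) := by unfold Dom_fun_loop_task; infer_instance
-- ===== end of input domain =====

-- B replaces A's O(num) trial division + accumulated prime list (membership test)
-- by a sqrt-bounded trial division and a single comprehension; return value only,
-- `start` is unused by both, matching A.

-- ===== PORT A =====
-- step of A's main loop; the inner for/else with break is the short-circuit `any`
def aStep (st : List String × List Int) (num : Int) : List String × List Int :=
  let primeNumber :=
    if (PySem.List.pyRange 2 num 1).any (fun i => PySem.Int.mod num i == 0)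
    then st.2 else st.2 ++ [num]
  let numbers :=
    if primeNumber.contains num then st.1 ++ ["Prime"]
    else if PySem.Int.mod num 3 == 0 && PySem.Int.mod num 5 == 0 then st.1 ++ ["FizzBuzz"]
    else if PySem.Int.mod num 3 == 0 then st.1 ++ ["Fizz"]
    else if PySem.Int.mod num 5 == 0 then st.1 ++ ["Buzz"]
    else st.1 ++ [PySem.Int.toStr num]
  (numbers, primeNumber)

def fun_loop_task (start : Int) (n : Int) : List String :=
  ((PySem.List.pyRange 1 (n + 1) 1).foldl aStep ([], [])).1

-- ===== PORT B =====
-- Source B's `while i * i <= num` loop of is_prime (returns False at the first divisor)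
def bTrial (num : Int) (i : Int) : Bool :=
  if _h : i * i ≤ num then
    if PySem.Int.mod num i == 0 then false else bTrial num (i + 1)
  else true
termination_by (num + 1 - i).toNat
decreasing_by
  have hle : i ≤ num := by nlinarith
  omega

def bIsPrime (num : Int) : Bool := bTrial num 2

def bClassify (num : Int) : String :=
  if bIsPrime num then "Prime"
  else if PySem.Int.mod num 15 == 0 then "FizzBuzz"
  else if PySem.Int.mod num 3 == 0 then "Fizz"
  else if PySem.Int.mod num 5 == 0 then "Buzz"
  else PySem.Int.toStr num

def fun_loop_task_alt (start : Int) (n : Int) : List String :=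
  (PySem.List.pyRange 1 (n + 1) 1).map bClassify

-- ===== PRECONDITION & SPEC =====
def Spec_fun_loop_task (start : Int) (n : Int) (out : List String) : Prop := out = fun_loop_task_alt start n
instance (start : Int) (n : Int) (out : List String) : Decidable (Spec_fun_loop_task start n out) := by unfold Spec_fun_loop_task; infer_instance

-- ===== CLAIM (what is proved, stated in full; the proofs are below) =====
def Claim_equal_fun_loop_task : Prop := ∀ (start : Int) (n : Int), Dom_fun_loop_task start n → Spec_fun_loop_task start n (fun_loop_task start n)

-- ===== LEMMAS AND PROOFS =====

-- A's per-element value: "num has a divisor in [2,num)" decides the Prime branch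
def aHasDiv (num : Int) : Bool :=
  (PySem.List.pyRange 2 num 1).any (fun i => PySem.Int.mod num i == 0)

def aClassify (num : Int) : String :=
  if aHasDiv num = false then "Prime"
  else if PySem.Int.mod num 3 == 0 && PySem.Int.mod num 5 == 0 then "FizzBuzz"
  else if PySem.Int.mod num 3 == 0 then "Fizz"
  else if PySem.Int.mod num 5 == 0 then "Buzz"
  else PySem.Int.toStr num

lemma aHasDiv_iff (num : Int) :
    aHasDiv num = true ↔ ∃ i, 2 ≤ i ∧ i < num ∧ num % i = 0 := by
  unfold aHasDiv
  simp only [List.any_eq_true, PySem.List.mem_pyRange_one, beq_iff_eq]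
  constructor
  · rintro ⟨i, ⟨h2, hlt⟩, hmod⟩
    exact ⟨i, h2, hlt, by rwa [PySem.Int.mod_eq_emod_of_pos (by omega)] at hmod⟩
  · rintro ⟨i, h2, hlt, hmod⟩
    exact ⟨i, ⟨h2, hlt⟩, by rwa [PySem.Int.mod_eq_emod_of_pos (by omega)]⟩

lemma bTrial_false_iff (num : Int) :
    ∀ (k : Nat) (i : Int), (num + 1 - i).toNat = k → 2 ≤ i →
      (bTrial num i = false ↔ ∃ j, 2 ≤ j ∧ i ≤ j ∧ j * j ≤ num ∧ num % j = 0) := by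
  intro k
  induction k using Nat.strong_induction_on with
  | _ k ih =>
    intro i hk hi
    rw [bTrial]
    split_ifs with h1 h2
    · -- divisor found at i
      simp only [eq_self_iff_true, true_iff]
      refine ⟨i, hi, le_refl i, h1, ?_⟩
      rwa [PySem.Int.mod_eq_emod_of_pos (by omega), beq_iff_eq] at h2
    · -- i is not a divisor, recurse
      have hmi : num % i ≠ 0 := by
        rwa [PySem.Int.mod_eq_emod_of_pos (by omega), beq_iff_eq] at h2
      have hle : i ≤ num := by nlinarith
      rw [ih ((num + 1 - (i + 1)).toNat) (by omega) (i + 1) rfl (by omega)]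
      constructor
      · rintro ⟨j, hj2, hij, hjs, hjm⟩
        exact ⟨j, hj2, by omega, hjs, hjm⟩
      · rintro ⟨j, hj2, hij, hjs, hjm⟩
        refine ⟨j, hj2, ?_, hjs, hjm⟩
        rcases eq_or_lt_of_le hij with h | h
        · exact absurd hjm (by rw [← h]; exact hmi)
        · omega
    · -- i*i > num : no divisor j ≥ i can have j*j ≤ num
      constructor
      · intro hf; exact absurd hf (by simp)
      · rintro ⟨j, hj2, hij, hjs, _⟩
        have : i * i ≤ j * j := by nlinarith
        omega

lemma sqrt_bridge (num : Int) (h1 : 1 ≤ num) :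
    (∃ i, 2 ≤ i ∧ i < num ∧ num % i = 0) ↔ (∃ j, 2 ≤ j ∧ j * j ≤ num ∧ num % j = 0) := by
  constructor
  · rintro ⟨d, hd2, hdlt, hdm⟩
    by_cases hs : d * d ≤ num
    · exact ⟨d, hd2, hs, hdm⟩
    · push_neg at hs
      have hdvd : d ∣ num := Int.dvd_of_emod_eq_zero hdm
      set e := num / d with he_def
      have he : d * e = num := Int.mul_ediv_cancel' hdvd
      have he0 : 0 ≤ e := Int.ediv_nonneg (by omega) (by omega)
      have he2 : 2 ≤ e := by
        by_contra hc
        push_neg at hc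
        have : e = 0 ∨ e = 1 := by omega
        rcases this with h | h <;> rw [h] at he <;> omega
      have hed : e < d := by nlinarith
      refine ⟨e, he2, by nlinarith, ?_⟩
      exact Int.emod_eq_zero_of_dvd ⟨d, by rw [← he]; ring⟩
  · rintro ⟨j, hj2, hjs, hjm⟩
    exact ⟨j, hj2, by nlinarith, hjm⟩

lemma bIsPrime_eq (num : Int) (h1 : 1 ≤ num) : bIsPrime num = !aHasDiv num := by
  rcases hb : bTrial num 2 with _ | _
  · have : ∃ j, 2 ≤ j ∧ 2 ≤ j ∧ j * j ≤ num ∧ num % j = 0 :=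
      (bTrial_false_iff num _ 2 rfl (le_refl 2)).1 hb
    have ha : aHasDiv num = true := by
      rw [aHasDiv_iff, sqrt_bridge num h1]
      obtain ⟨j, hj2, _, hjs, hjm⟩ := this
      exact ⟨j, hj2, hjs, hjm⟩
    simp [bIsPrime, hb, ha]
  · have ha : aHasDiv num = false := by
      by_contra hc
      have ha' : aHasDiv num = true := by
        cases h : aHasDiv num
        · exact absurd h hc
        · rfl
      have := (sqrt_bridge num h1).1 ((aHasDiv_iff num).1 ha')
      obtain ⟨j, hj2, hjs, hjm⟩ := this
      have : bTrial num 2 = false :=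
        (bTrial_false_iff num _ 2 rfl (le_refl 2)).2 ⟨j, hj2, hj2, hjs, hjm⟩
      rw [hb] at this
      exact absurd this (by simp)
    simp [bIsPrime, hb, ha]

lemma classify_eq (num : Int) (h1 : 1 ≤ num) : aClassify num = bClassify num := by
  unfold aClassify bClassify
  rw [bIsPrime_eq num h1]
  cases h : aHasDiv num with
  | false => simp [h]
  | true =>
    have h15 : ((15:Int) ∣ num) ↔ ((3:Int) ∣ num ∧ (5:Int) ∣ num) := by omega
    by_cases h3 : (3:Int) ∣ num <;> by_cases h5 : (5:Int) ∣ num <;>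
      simp [h, PySem.Int.mod_eq_zero_iff_dvd, h3, h5, h15]

lemma not_mem_of_lt (pr : List Int) (num : Int) (h : ∀ x ∈ pr, x < num) :
    num ∉ pr := fun hm => lt_irrefl num (h num hm)

lemma foldA (l : List Int) :
    l.Pairwise (· < ·) →
    ∀ (acc : List String) (pr : List Int), (∀ x ∈ pr, ∀ y ∈ l, x < y) →
      (l.foldl aStep (acc, pr)).1 = acc ++ l.map aClassify := by
  induction l with
  | nil => intro _ acc pr _; simp
  | cons num tl ih =>
    intro hpw acc pr hinv
    have hstep : aStep (acc, pr) num = (acc ++ [aClassify num],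
        if aHasDiv num then pr else pr ++ [num]) := by
      unfold aStep aClassify aHasDiv
      rcases h : (PySem.List.pyRange 2 num 1).any (fun i => PySem.Int.mod num i == 0) with _ | _
      · -- no divisor: num appended, contains = true
        simp [List.contains_eq_mem]
      · -- divisor found: pr unchanged, num not in pr
        have hm : num ∉ pr :=
          not_mem_of_lt pr num (fun x hx => hinv x hx num (by simp))
        simp [hm]
        split_ifs <;> simp
    rw [List.foldl_cons, hstep]
    have hpw' : tl.Pairwise (· < ·) := (List.pairwise_cons.1 hpw).2
    have hlt : ∀ y ∈ tl, num < y := (List.pairwise_cons.1 hpw).1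
    have hinv' : ∀ x ∈ (if aHasDiv num then pr else pr ++ [num]), ∀ y ∈ tl, x < y := by
      intro x hx y hy
      split_ifs at hx with hd
      · exact hinv x hx y (by simp [hy])
      · rcases List.mem_append.1 hx with h | h
        · exact hinv x h y (by simp [hy])
        · simp at h; rw [h]; exact hlt y hy
    rw [ih hpw' (acc ++ [aClassify num]) _ hinv']
    simp

-- ===== VERDICT (by name: the statement is the Claim_ definition above) =====
theorem fun_loop_task_spec : Claim_equal_fun_loop_task := by
  intro start n _
  unfold Spec_fun_loop_task fun_loop_task fun_loop_task_alt
  rw [foldA _ (PySem.List.pairwise_lt_pyRange_one 1 (n+1)) [] [] (by simp)]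
  simp only [List.nil_append]
  exact List.map_congr_left fun num hm =>
    classify_eq num ((PySem.List.mem_pyRange_one.1 hm).1)
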